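-- pv_equiv track=rewrite | github.com/tdolega/advent-of-code-2024 | 12/solution.py | find_fences
-- ===== SOURCE A (Python) =====
-- def find_fences(garden: list[list[str]], visited: set[tuple[int, int]], plant: str, last_x: int, last_y: int, dx: int, dy: int):
--     x, y = last_x + dx, last_y + dy
--     if (x, y) in visited:
--         return []
--     if y < 0 or y >= len(garden) or x < 0 or x >= len(garden[y]) or garden[y][x] != plant:
--         return [(last_x, last_y, dx, dy)]  # fence location and direction
--     visited.add((x, y))
--     return sum((find_fences(garden, visited, plant, x, y, dx, dy) for dx, dy in [(0, 1), (0, -1), (1, 0), (-1, 0)]), start=[])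
-- ===== SOURCE B (Python) =====
-- def find_fences(garden: list[list[str]], visited: set[tuple[int, int]], plant: str, last_x: int, last_y: int, dx: int, dy: int):
--     # Iterative flood fill with an explicit stack; same visited mutation and
--     # same pre-order fence list as the recursive version.
--     fences = []
--     stack = [(last_x, last_y, dx, dy)]
--     while stack:
--         sx, sy, d_x, d_y = stack.pop()
--         x, y = sx + d_x, sy + d_y
--         if (x, y) in visited:
--             continue
--         if y < 0 or y >= len(garden) or x < 0 or x >= len(garden[y]) or garden[y][x] != plant:
--             fences.append((sx, sy, d_x, d_y))
--             continue
--         visited.add((x, y))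
--         for nd in reversed([(0, 1), (0, -1), (1, 0), (-1, 0)]):
--             stack.append((x, y, nd[0], nd[1]))
--     return fences
-- ===== Notes on version B (the rewrite author's own statement) =====
-- stated objective: alternative
-- what changed: The recursive DFS (four recursive calls concatenated with sum(..., start=[])) is replaced by an iterative flood fill over an explicit stack with a single accumulator list, producing the same pre-order fence list without Python recursion (no RecursionError on deep regions).
import Mathlib
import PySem

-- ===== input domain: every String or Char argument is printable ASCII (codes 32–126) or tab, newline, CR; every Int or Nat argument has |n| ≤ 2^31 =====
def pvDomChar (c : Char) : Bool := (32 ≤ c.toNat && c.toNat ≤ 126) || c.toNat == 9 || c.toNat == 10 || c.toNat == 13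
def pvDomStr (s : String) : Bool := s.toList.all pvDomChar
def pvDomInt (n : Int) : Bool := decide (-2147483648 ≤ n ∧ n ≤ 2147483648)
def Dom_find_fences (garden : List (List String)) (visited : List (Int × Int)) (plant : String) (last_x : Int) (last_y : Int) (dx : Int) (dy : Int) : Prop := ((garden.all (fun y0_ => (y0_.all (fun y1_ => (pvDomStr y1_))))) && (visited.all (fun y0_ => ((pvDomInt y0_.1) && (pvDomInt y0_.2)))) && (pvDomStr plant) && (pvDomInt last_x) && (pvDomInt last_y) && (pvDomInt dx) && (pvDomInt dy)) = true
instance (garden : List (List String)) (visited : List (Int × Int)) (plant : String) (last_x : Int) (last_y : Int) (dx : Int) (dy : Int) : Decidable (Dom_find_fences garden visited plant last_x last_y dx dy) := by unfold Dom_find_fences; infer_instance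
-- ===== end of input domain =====

-- B replaces A's recursive DFS by an iterative explicit-stack flood fill with one accumulator
-- (same pre-order fence list). Both Pythons mutate `visited` identically in place; the
-- equivalence proved here is about the RETURN value (the Lean ports thread `visited` functionally).

-- All in-bounds cells of the garden, and the count of those not yet visited.
-- Used only as the fuel bound making the two recursions total (Python's recursion/loop
-- terminates for the same reason); the fuel is never exhausted, as the proofs below show.
def pvCells (garden : List (List String)) : List (Int × Int) :=
  garden.zipIdx.flatMap (fun ry => (List.range ry.1.length).map (fun k : Nat => ((k : Int), (ry.2 : Int))))

def pvFree (garden : List (List String)) (v : List (Int × Int)) : Nat :=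
  (pvCells garden).countP (fun p => !(decide (p ∈ v)))

-- ===== PORT A =====
-- Literal port of A's recursion; `visited` (a Python set, mutated in place) is threaded as the
-- second component; the Nat argument is fuel making the recursion structural (never exhausted).
def pvFindA (garden : List (List String)) (plant : String) :
    Nat → List (Int × Int) → Int → Int → Int → Int →
      List (Int × Int × Int × Int) × List (Int × Int)
  | 0, v, _, _, _, _ => ([], v)
  | fuel + 1, v, last_x, last_y, dx, dy =>
    let x := last_x + dx
    let y := last_y + dy
    if (x, y) ∈ v then
      ([], v)
    else if y < 0 ∨ (garden.length : Int) ≤ y ∨ x < 0 ∨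
        (((PySem.List.pyGet? garden y).getD []).length : Int) ≤ x ∨
        PySem.List.pyGet? ((PySem.List.pyGet? garden y).getD []) x ≠ some plant then
      ([(last_x, last_y, dx, dy)], v)
    else
      let v1 := PySem.Set.add v (x, y)
      let r1 := pvFindA garden plant fuel v1 x y 0 1
      let r2 := pvFindA garden plant fuel r1.2 x y 0 (-1)
      let r3 := pvFindA garden plant fuel r2.2 x y 1 0
      let r4 := pvFindA garden plant fuel r3.2 x y (-1) 0
      (((([] ++ r1.1) ++ r2.1) ++ r3.1) ++ r4.1, r4.2)

def find_fences (garden : List (List String)) (visited : List (Int × Int)) (plant : String) (last_x : Int) (last_y : Int) (dx : Int) (dy : Int) : List (Int × Int × Int × Int) :=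
  (pvFindA garden plant (pvFree garden visited + 1) visited last_x last_y dx dy).1

-- ===== PORT B =====
-- Literal port of B's while-loop: head of the list = top of the stack (Python pushes the four
-- probes reversed and pops from the end, so the popped order is exactly this cons order);
-- the Nat argument is fuel making the loop structural (never exhausted).
def pvLoopB (garden : List (List String)) (plant : String) :
    Nat → List (Int × Int × Int × Int) → List (Int × Int) → List (Int × Int × Int × Int)
  | 0, _, _ => []
  | _ + 1, [], _ => []
  | fuel + 1, (sx, sy, d_x, d_y) :: rest, v =>
    let x := sx + d_x
    let y := sy + d_y
    if (x, y) ∈ v then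
      pvLoopB garden plant fuel rest v
    else if y < 0 ∨ (garden.length : Int) ≤ y ∨ x < 0 ∨
        (((PySem.List.pyGet? garden y).getD []).length : Int) ≤ x ∨
        PySem.List.pyGet? ((PySem.List.pyGet? garden y).getD []) x ≠ some plant then
      (sx, sy, d_x, d_y) :: pvLoopB garden plant fuel rest v
    else
      pvLoopB garden plant fuel
        ((x, y, 0, 1) :: (x, y, 0, -1) :: (x, y, 1, 0) :: (x, y, -1, 0) :: rest)
        (PySem.Set.add v (x, y))

def find_fences_alt (garden : List (List String)) (visited : List (Int × Int)) (plant : String) (last_x : Int) (last_y : Int) (dx : Int) (dy : Int) : List (Int × Int × Int × Int) :=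
  pvLoopB garden plant (5 * pvFree garden visited + 2) [(last_x, last_y, dx, dy)] visited

-- ===== PRECONDITION & SPEC =====
def Spec_find_fences (garden : List (List String)) (visited : List (Int × Int)) (plant : String) (last_x : Int) (last_y : Int) (dx : Int) (dy : Int) (out : List (Int × Int × Int × Int)) : Prop := out = find_fences_alt garden visited plant last_x last_y dx dy
instance (garden : List (List String)) (visited : List (Int × Int)) (plant : String) (last_x : Int) (last_y : Int) (dx : Int) (dy : Int) (out : List (Int × Int × Int × Int)) : Decidable (Spec_find_fences garden visited plant last_x last_y dx dy out) := by unfold Spec_find_fences; infer_instance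

-- ===== CLAIM (what is proved, stated in full; the proofs are below) =====
def Claim_equal_find_fences : Prop := ∀ (garden : List (List String)) (visited : List (Int × Int)) (plant : String) (last_x : Int) (last_y : Int) (dx : Int) (dy : Int), Dom_find_fences garden visited plant last_x last_y dx dy → Spec_find_fences garden visited plant last_x last_y dx dy (find_fences garden visited plant last_x last_y dx dy)

-- ===== LEMMAS AND PROOFS =====

theorem pv_countP_lt_countP {α : Type} (l : List α) (p q : α → Bool)
    (h : ∀ a ∈ l, p a = true → q a = true) (c : α) (hc : c ∈ l)
    (hq : q c = true) (hp : ¬ p c = true) : l.countP p < l.countP q := by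
  induction l with
  | nil => cases hc
  | cons a t ih =>
    simp only [List.countP_cons]
    have hmono := List.countP_mono_left (l := t) (p := p) (q := q)
      (fun b hb hpb => h b (List.mem_cons_of_mem _ hb) hpb)
    have hpq := h a (List.mem_cons_self)
    by_cases hca : c = a
    · subst hca
      rw [if_neg hp, if_pos hq]
      omega
    · have hct : c ∈ t := by
        rcases List.mem_cons.mp hc with h1 | h1
        · exact absurd h1 hca
        · exact h1
      have := ih (fun b hb hpb => h b (List.mem_cons_of_mem _ hb) hpb) hct
      split_ifs with h1 h2
      · omega
      · exact absurd (hpq h1) h2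
      · omega
      · omega

theorem pvFree_mono (garden : List (List String)) (v v' : List (Int × Int))
    (h : ∀ p ∈ v, p ∈ v') : pvFree garden v' ≤ pvFree garden v := by
  apply List.countP_mono_left
  intro a _ ha
  simp only [Bool.not_eq_eq_eq_not, Bool.not_true, decide_eq_false_iff_not] at ha ⊢
  exact fun hv => ha (h a hv)

theorem pv_mem_set_add (s : List (Int × Int)) (x p : Int × Int) (h : p ∈ s) :
    p ∈ PySem.Set.add s x := by
  simp [PySem.Set.add]
  split <;> simp [h]

theorem pv_mem_set_add_self (s : List (Int × Int)) (x : Int × Int) :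
    x ∈ PySem.Set.add s x := by
  simp only [PySem.Set.add, PySem.Set.contains]
  split <;> rename_i hc
  · simpa using hc
  · simp

theorem pv_mem_pvCells (garden : List (List String)) (x y : Int)
    (hy0 : 0 ≤ y) (hy : y < (garden.length : Int)) (hx0 : 0 ≤ x)
    (hx : x < ((((PySem.List.pyGet? garden y).getD []).length : Int))) :
    (x, y) ∈ pvCells garden := by
  rw [PySem.List.pyGet?_of_nonneg garden hy0] at hx
  have hy' : y.toNat < garden.length := by omega
  rw [List.getElem?_eq_getElem hy'] at hx
  simp only [Option.getD_some] at hx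
  simp only [pvCells, List.mem_flatMap]
  refine ⟨(garden[y.toNat], y.toNat), List.mem_zipIdx_iff_getElem?.mpr (by simp [hy']), ?_⟩
  have hxy : ((x.toNat : Int), (y.toNat : Int)) = (x, y) := by
    simp only [Prod.mk.injEq]
    constructor <;> omega
  show (x, y) ∈ (List.range garden[y.toNat].length).map (fun k : ℕ => ((k : Int), (y.toNat : Int)))
  rw [← hxy]
  exact List.mem_map_of_mem (List.mem_range.mpr (by omega))

theorem pvFree_add_lt (garden : List (List String)) (v : List (Int × Int)) (x y : Int)
    (hmem : (x, y) ∈ pvCells garden) (hnv : (x, y) ∉ v) :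
    pvFree garden (PySem.Set.add v (x, y)) < pvFree garden v := by
  unfold pvFree
  refine pv_countP_lt_countP _ _ _ ?_ (x, y) hmem ?_ ?_
  · intro a ha hpa
    simp only [Bool.not_eq_eq_eq_not, Bool.not_true, decide_eq_false_iff_not] at hpa ⊢
    exact fun hvv => hpa (pv_mem_set_add v (x, y) a hvv)
  · simpa using hnv
  · simp [pv_mem_set_add_self v (x, y)]

-- Fuel-free (well-founded) version of A's recursion, used only in the proofs; the subtype
-- carries the monotonicity of the visited set that its termination measure needs.
def pvFindAW (garden : List (List String)) (plant : String) (v : List (Int × Int))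
    (last_x last_y dx dy : Int) :
    List (Int × Int × Int × Int) × { v' : List (Int × Int) // ∀ p ∈ v, p ∈ v' } :=
  let x := last_x + dx
  let y := last_y + dy
  if _hv : (x, y) ∈ v then
    ([], ⟨v, fun _ h => h⟩)
  else if _hb : y < 0 ∨ (garden.length : Int) ≤ y ∨ x < 0 ∨
      (((PySem.List.pyGet? garden y).getD []).length : Int) ≤ x ∨
      PySem.List.pyGet? ((PySem.List.pyGet? garden y).getD []) x ≠ some plant then
    ([(last_x, last_y, dx, dy)], ⟨v, fun _ h => h⟩)
  else
    let v1 := PySem.Set.add v (x, y)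
    let r1 := pvFindAW garden plant v1 x y 0 1
    let r2 := pvFindAW garden plant r1.2.1 x y 0 (-1)
    let r3 := pvFindAW garden plant r2.2.1 x y 1 0
    let r4 := pvFindAW garden plant r3.2.1 x y (-1) 0
    (((([] ++ r1.1) ++ r2.1) ++ r3.1) ++ r4.1,
     ⟨r4.2.1, fun p hp =>
        r4.2.2 p (r3.2.2 p (r2.2.2 p (r1.2.2 p (pv_mem_set_add v (x, y) p hp))))⟩)
termination_by pvFree garden v
decreasing_by
  · push_neg at _hb
    exact pvFree_add_lt garden v x y
      (pv_mem_pvCells garden x y (by omega) (by omega) (by omega) (by omega)) _hv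
  all_goals
  · push_neg at _hb
    have hlt : pvFree garden (PySem.Set.add v (x, y)) < pvFree garden v :=
      pvFree_add_lt garden v x y
        (pv_mem_pvCells garden x y (by omega) (by omega) (by omega) (by omega)) _hv
    refine lt_of_le_of_lt ?_ hlt
    first
      | exact pvFree_mono garden _ _ r1.2.2
      | exact pvFree_mono garden _ _ (fun p hp => r2.2.2 p (r1.2.2 p hp))
      | exact pvFree_mono garden _ _ (fun p hp => r3.2.2 p (r2.2.2 p (r1.2.2 p hp)))

-- Fuel-free (well-founded) version of B's loop, used only in the proofs.
def pvLoopW (garden : List (List String)) (plant : String) :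
    List (Int × Int × Int × Int) → List (Int × Int) → List (Int × Int × Int × Int)
  | [], _ => []
  | (sx, sy, d_x, d_y) :: rest, v =>
    let x := sx + d_x
    let y := sy + d_y
    if _hv : (x, y) ∈ v then
      pvLoopW garden plant rest v
    else if _hb : y < 0 ∨ (garden.length : Int) ≤ y ∨ x < 0 ∨
        (((PySem.List.pyGet? garden y).getD []).length : Int) ≤ x ∨
        PySem.List.pyGet? ((PySem.List.pyGet? garden y).getD []) x ≠ some plant then
      (sx, sy, d_x, d_y) :: pvLoopW garden plant rest v
    else
      pvLoopW garden plant
        ((x, y, 0, 1) :: (x, y, 0, -1) :: (x, y, 1, 0) :: (x, y, -1, 0) :: rest)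
        (PySem.Set.add v (x, y))
termination_by stack v => 5 * pvFree garden v + stack.length
decreasing_by
  · simp only [List.length_cons]; omega
  · simp only [List.length_cons]; omega
  · push_neg at _hb
    have hlt : pvFree garden (PySem.Set.add v (x, y)) < pvFree garden v :=
      pvFree_add_lt garden v x y
        (pv_mem_pvCells garden x y (by omega) (by omega) (by omega) (by omega)) _hv
    have hlt2 : pvFree garden (PySem.Set.add v (sx + d_x, sy + d_y)) < pvFree garden v := hlt
    simp only [List.length_cons]
    omega

-- The fueled port of A computes the fuel-free recursion whenever the fuel exceeds the measure.
theorem pvFindA_eq_W (garden : List (List String)) (plant : String) :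
    ∀ (fuel : Nat) (v : List (Int × Int)), pvFree garden v < fuel →
    ∀ (last_x last_y dx dy : Int),
      pvFindA garden plant fuel v last_x last_y dx dy =
        ((pvFindAW garden plant v last_x last_y dx dy).1,
         (pvFindAW garden plant v last_x last_y dx dy).2.1) := by
  intro fuel
  induction fuel with
  | zero => intro v hn; omega
  | succ n ih =>
    intro v hn last_x last_y dx dy
    rw [pvFindA, pvFindAW]
    by_cases hv : (last_x + dx, last_y + dy) ∈ v
    · simp [hv]
    by_cases hb : last_y + dy < 0 ∨ (garden.length : Int) ≤ last_y + dy ∨ last_x + dx < 0 ∨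
        (((PySem.List.pyGet? garden (last_y + dy)).getD []).length : Int) ≤ last_x + dx ∨
        PySem.List.pyGet? ((PySem.List.pyGet? garden (last_y + dy)).getD []) (last_x + dx) ≠ some plant
    · simp [hv, hb]
    · have hbb := hb
      push_neg at hbb
      have hfree : pvFree garden (PySem.Set.add v (last_x + dx, last_y + dy)) < pvFree garden v :=
        pvFree_add_lt garden v (last_x + dx) (last_y + dy)
          (pv_mem_pvCells garden (last_x + dx) (last_y + dy) (by omega) (by omega) (by omega)
            (by omega)) hv
      simp only [hv, hb, if_neg, dif_neg, not_false_eq_true]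
      generalize hg1 : pvFindAW garden plant (PySem.Set.add v (last_x + dx, last_y + dy))
        (last_x + dx) (last_y + dy) 0 1 = r1
      generalize hg2 : pvFindAW garden plant r1.2.1 (last_x + dx) (last_y + dy) 0 (-1) = r2
      generalize hg3 : pvFindAW garden plant r2.2.1 (last_x + dx) (last_y + dy) 1 0 = r3
      generalize hg4 : pvFindAW garden plant r3.2.1 (last_x + dx) (last_y + dy) (-1) 0 = r4
      have e1 : pvFree garden (PySem.Set.add v (last_x + dx, last_y + dy)) < n := by omega
      have e2 : pvFree garden r1.2.1 < n := by
        rw [← hg1]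
        exact lt_of_le_of_lt (pvFree_mono garden _ _ (pvFindAW garden plant
          (PySem.Set.add v (last_x + dx, last_y + dy)) (last_x + dx) (last_y + dy) 0 1).2.2) e1
      have e3 : pvFree garden r2.2.1 < n := by
        rw [← hg2]
        exact lt_of_le_of_lt (pvFree_mono garden _ _ (pvFindAW garden plant
          r1.2.1 (last_x + dx) (last_y + dy) 0 (-1)).2.2) e2
      have e4 : pvFree garden r3.2.1 < n := by
        rw [← hg3]
        exact lt_of_le_of_lt (pvFree_mono garden _ _ (pvFindAW garden plant
          r2.2.1 (last_x + dx) (last_y + dy) 1 0).2.2) e3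
      rw [ih _ e1, hg1, ih _ e2, hg2, ih _ e3, hg3, ih _ e4, hg4]

-- The fueled port of B computes the fuel-free loop whenever the fuel exceeds the measure.
theorem pvLoopB_eq_W (garden : List (List String)) (plant : String) :
    ∀ (fuel : Nat) (stack : List (Int × Int × Int × Int)) (v : List (Int × Int)),
      5 * pvFree garden v + stack.length < fuel →
      pvLoopB garden plant fuel stack v = pvLoopW garden plant stack v := by
  intro fuel
  induction fuel with
  | zero => intro stack v hn; omega
  | succ n ih =>
    intro stack v hn
    match stack with
    | [] => rw [pvLoopB, pvLoopW]
    | (sx, sy, d_x, d_y) :: rest =>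
      rw [pvLoopB, pvLoopW]
      by_cases hv : (sx + d_x, sy + d_y) ∈ v
      · simp only [hv, if_pos, dif_pos]
        exact ih rest v (by simp only [List.length_cons] at hn; omega)
      by_cases hb : sy + d_y < 0 ∨ (garden.length : Int) ≤ sy + d_y ∨ sx + d_x < 0 ∨
          (((PySem.List.pyGet? garden (sy + d_y)).getD []).length : Int) ≤ sx + d_x ∨
          PySem.List.pyGet? ((PySem.List.pyGet? garden (sy + d_y)).getD []) (sx + d_x) ≠ some plant
      · simp only [hv, hb, if_neg, if_pos, dif_neg, dif_pos, not_false_eq_true]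
        rw [ih rest v (by simp only [List.length_cons] at hn; omega)]
      · have hbb := hb
        push_neg at hbb
        have hfree : pvFree garden (PySem.Set.add v (sx + d_x, sy + d_y)) < pvFree garden v :=
          pvFree_add_lt garden v (sx + d_x) (sy + d_y)
            (pv_mem_pvCells garden (sx + d_x) (sy + d_y) (by omega) (by omega) (by omega)
              (by omega)) hv
        simp only [hv, hb, if_neg, dif_neg, not_false_eq_true]
        exact ih _ _ (by simp only [List.length_cons] at hn ⊢; omega)

-- Processing one stack item in B's loop equals running A's recursion on it and then the rest
-- of the stack with the updated visited set (strong induction on the count of unvisited cells).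
theorem pvLoopW_eq_findAW (garden : List (List String)) (plant : String) :
    ∀ (n : Nat) (v : List (Int × Int)), pvFree garden v ≤ n →
    ∀ (sx sy d_x d_y : Int) (rest : List (Int × Int × Int × Int)),
      pvLoopW garden plant ((sx, sy, d_x, d_y) :: rest) v =
        (pvFindAW garden plant v sx sy d_x d_y).1 ++
          pvLoopW garden plant rest (pvFindAW garden plant v sx sy d_x d_y).2.1 := by
  intro n
  induction n with
  | zero =>
    intro v hn sx sy d_x d_y rest
    rw [pvLoopW, pvFindAW]
    by_cases hv : (sx + d_x, sy + d_y) ∈ v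
    · simp [hv]
    by_cases hb : sy + d_y < 0 ∨ (garden.length : Int) ≤ sy + d_y ∨ sx + d_x < 0 ∨
        (((PySem.List.pyGet? garden (sy + d_y)).getD []).length : Int) ≤ sx + d_x ∨
        PySem.List.pyGet? ((PySem.List.pyGet? garden (sy + d_y)).getD []) (sx + d_x) ≠ some plant
    · simp [hv, hb]
    · exfalso
      push_neg at hb
      have := pvFree_add_lt garden v (sx + d_x) (sy + d_y)
        (pv_mem_pvCells garden _ _ (by omega) (by omega) (by omega) (by omega)) hv
      omega
  | succ n ih =>
    intro v hn sx sy d_x d_y rest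
    by_cases hv : (sx + d_x, sy + d_y) ∈ v
    · rw [pvLoopW, pvFindAW]; simp [hv]
    by_cases hb : sy + d_y < 0 ∨ (garden.length : Int) ≤ sy + d_y ∨ sx + d_x < 0 ∨
        (((PySem.List.pyGet? garden (sy + d_y)).getD []).length : Int) ≤ sx + d_x ∨
        PySem.List.pyGet? ((PySem.List.pyGet? garden (sy + d_y)).getD []) (sx + d_x) ≠ some plant
    · rw [pvLoopW, pvFindAW]; simp [hv, hb]
    · have hbb := hb
      push_neg at hbb
      have hfree : pvFree garden (PySem.Set.add v (sx + d_x, sy + d_y)) < pvFree garden v :=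
        pvFree_add_lt garden v (sx + d_x) (sy + d_y)
          (pv_mem_pvCells garden (sx + d_x) (sy + d_y) (by omega) (by omega) (by omega)
            (by omega)) hv
      have e1 : pvFree garden (PySem.Set.add v (sx + d_x, sy + d_y)) ≤ n := by omega
      rw [pvLoopW, pvFindAW]
      simp only [hv, hb, dif_neg, not_false_eq_true]
      generalize hg1 : pvFindAW garden plant (PySem.Set.add v (sx + d_x, sy + d_y))
        (sx + d_x) (sy + d_y) 0 1 = r1
      generalize hg2 : pvFindAW garden plant r1.2.1 (sx + d_x) (sy + d_y) 0 (-1) = r2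
      generalize hg3 : pvFindAW garden plant r2.2.1 (sx + d_x) (sy + d_y) 1 0 = r3
      generalize hg4 : pvFindAW garden plant r3.2.1 (sx + d_x) (sy + d_y) (-1) 0 = r4
      have e2 : pvFree garden r1.2.1 ≤ n := by
        rw [← hg1]; exact le_trans (pvFree_mono garden _ _ (pvFindAW garden plant
          (PySem.Set.add v (sx + d_x, sy + d_y)) (sx + d_x) (sy + d_y) 0 1).2.2) e1
      have e3 : pvFree garden r2.2.1 ≤ n := by
        rw [← hg2]; exact le_trans (pvFree_mono garden _ _ (pvFindAW garden plant
          r1.2.1 (sx + d_x) (sy + d_y) 0 (-1)).2.2) e2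
      have e4 : pvFree garden r3.2.1 ≤ n := by
        rw [← hg3]; exact le_trans (pvFree_mono garden _ _ (pvFindAW garden plant
          r2.2.1 (sx + d_x) (sy + d_y) 1 0).2.2) e3
      rw [ih _ e1, hg1, ih _ e2, hg2, ih _ e3, hg3, ih _ e4, hg4]
      simp [List.append_assoc]

-- ===== VERDICT (by name: the statement is the Claim_ definition above) =====
theorem find_fences_spec : Claim_equal_find_fences := by
  intro garden visited plant last_x last_y dx dy _
  unfold Spec_find_fences find_fences find_fences_alt
  rw [pvFindA_eq_W garden plant _ visited (by omega)]
  rw [pvLoopB_eq_W garden plant _ _ visited (by simp only [List.length_cons, List.length_nil]; omega)]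
  rw [pvLoopW_eq_findAW garden plant (pvFree garden visited) visited le_rfl]
  rw [pvLoopW]
  simp
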